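-- pv_equiv track=rewrite | github.com/carmenne/advent_of_code_2024 | 2023/day1/part2.py | extract_last
-- ===== SOURCE A (Python) =====
-- VALID_WORDS = {"one": "1", "two": "2", "three": "3", "four": "4",
--                "five": "5", "six": "6", "seven": "7", "eight": "8", "nine": "9"}
--
-- VALID_LEN_3 = {"one", "two", "six"}
--
-- VALID_LEN_4 = {"four", "five", "nine"}
--
-- VALID_LEN_5 = {"three", "seven", "eight"}
--
-- def extract_last(line):
--     n = len(line)
--     for end in range(n - 1, -1, -1):
--         if line[end] in "123456789":
--             return line[end]
--         if end <= n - 3: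
--             if line[end:end + 3] in VALID_LEN_3:
--                 return VALID_WORDS[line[end:end + 3]]
--         if end <= n - 4:
--             if line[end:end + 4] in VALID_LEN_4:
--                 return VALID_WORDS[line[end:end + 4]]
--         if end <= n - 5:
--             if line[end:end + 5] in VALID_LEN_5:
--                 return VALID_WORDS[line[end:end + 5]]
-- ===== SOURCE B (Python) =====
-- DIGITS = "123456789"
-- WORDS = {"one": "1", "two": "2", "three": "3", "four": "4",
--          "five": "5", "six": "6", "seven": "7", "eight": "8", "nine": "9"}
--
-- def _token(line, i):
--     c = line[i]
--     if c in DIGITS: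
--         return c
--     for w, d in WORDS.items():
--         if line[i:i + len(w)] == w:
--             return d
--     return None
--
-- def extract_last(line):
--     tokens = [t for i in range(len(line)) if (t := _token(line, i)) is not None]
--     return tokens[-1] if tokens else None
-- ===== Notes on version B (the rewrite author's own statement) =====
-- stated objective: alternative
-- what changed: A probes backwards from the end of the string and early-returns on the first digit/word hit using three length-bucketed sets; B makes one forward pass collecting every token (digit or spelled digit) found at each start position into a list and returns the last one.
import Mathlib
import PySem

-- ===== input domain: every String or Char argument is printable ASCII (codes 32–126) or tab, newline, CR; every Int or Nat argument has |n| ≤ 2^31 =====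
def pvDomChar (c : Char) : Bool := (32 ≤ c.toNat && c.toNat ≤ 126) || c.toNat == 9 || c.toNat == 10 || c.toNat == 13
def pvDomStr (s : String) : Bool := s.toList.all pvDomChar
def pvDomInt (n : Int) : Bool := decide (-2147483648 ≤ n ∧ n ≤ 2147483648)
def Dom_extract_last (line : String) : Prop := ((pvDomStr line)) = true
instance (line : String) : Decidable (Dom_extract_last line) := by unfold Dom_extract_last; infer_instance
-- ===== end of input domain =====

-- B replaces A's backward probe-and-early-return scan by a forward pass that collects every
-- token (digit or spelled digit) start and returns the last one; same results, different traversal.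

-- ===== PORT A =====
-- Strings are ported on the List Char side (PySem.Chars).
def pvVALID_WORDS : PySem.Dict (List Char) String :=
  PySem.Dict.ofList [("one".toList, "1"), ("two".toList, "2"), ("three".toList, "3"),
    ("four".toList, "4"), ("five".toList, "5"), ("six".toList, "6"),
    ("seven".toList, "7"), ("eight".toList, "8"), ("nine".toList, "9")]

def pvVALID_LEN_3 : PySem.Set (List Char) :=
  PySem.Set.ofList ["one".toList, "two".toList, "six".toList]
def pvVALID_LEN_4 : PySem.Set (List Char) :=
  PySem.Set.ofList ["four".toList, "five".toList, "nine".toList]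
def pvVALID_LEN_5 : PySem.Set (List Char) :=
  PySem.Set.ofList ["three".toList, "seven".toList, "eight".toList]

-- A's for-loop with its early returns, as recursion over the descending index list.
-- `line[end] in "123456789"` (one-char substring test) is PySem.Chars.isIn [c] … (exact);
-- VALID_WORDS[s] is ported as getD — exact here, every lookup is guarded by set membership.
def extract_last_go (cs : List Char) (n : Int) : List Int → Option String
  | [] => none
  | e :: rest =>
    match PySem.List.pyGet? cs e with
    | none => none   -- unreachable: every e of range(n-1,-1,-1) is a valid index
    | some c =>
      if PySem.Chars.isIn [c] "123456789".toList then some (String.ofList [c])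
      else if e ≤ n - 3 && PySem.Set.contains pvVALID_LEN_3 (PySem.List.slice cs (some e) (some (e + 3))) then
        some (PySem.Dict.getD pvVALID_WORDS (PySem.List.slice cs (some e) (some (e + 3))) "")
      else if e ≤ n - 4 && PySem.Set.contains pvVALID_LEN_4 (PySem.List.slice cs (some e) (some (e + 4))) then
        some (PySem.Dict.getD pvVALID_WORDS (PySem.List.slice cs (some e) (some (e + 4))) "")
      else if e ≤ n - 5 && PySem.Set.contains pvVALID_LEN_5 (PySem.List.slice cs (some e) (some (e + 5))) then
        some (PySem.Dict.getD pvVALID_WORDS (PySem.List.slice cs (some e) (some (e + 5))) "")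
      else extract_last_go cs n rest

def extract_last (line : String) : Option String :=
  let n := PySem.Str.len line
  extract_last_go line.toList n (PySem.List.pyRange (n - 1) (-1) (-1))

-- ===== PORT B =====
-- Source B's WORDS dict, iterated with .items() only: the association list in insertion order.
def pvWORDS : List (List Char × String) :=
  [("one".toList, "1"), ("two".toList, "2"), ("three".toList, "3"),
   ("four".toList, "4"), ("five".toList, "5"), ("six".toList, "6"),
   ("seven".toList, "7"), ("eight".toList, "8"), ("nine".toList, "9")]

-- _token: the for-loop over WORDS.items() with its early return is List.find?.
def pvToken (cs : List Char) (i : Int) : Option String :=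
  match PySem.List.pyGet? cs i with
  | none => none   -- unreachable: every i of range(len(line)) is a valid index
  | some c =>
    if PySem.Chars.isIn [c] "123456789".toList then some (String.ofList [c])
    else
      match pvWORDS.find? (fun p => PySem.List.slice cs (some i) (some (i + (p.1.length : Int))) == p.1) with
      | some p => some p.2
      | none => none

-- the filtering comprehension is filterMap; `tokens[-1] if tokens else None` is pyGet? tokens (-1).
def extract_last_alt (line : String) : Option String :=
  let tokens := (PySem.List.pyRange 0 (PySem.Str.len line) 1).filterMap (pvToken line.toList)
  PySem.List.pyGet? tokens (-1)

-- ===== PRECONDITION & SPEC =====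
def Spec_extract_last (line : String) (out : Option String) : Prop := out = extract_last_alt line
instance (line : String) (out : Option String) : Decidable (Spec_extract_last line out) := by unfold Spec_extract_last; infer_instance

-- ===== CLAIM (what is proved, stated in full; the proofs are below) =====
def Claim_equal_extract_last : Prop := ∀ (line : String), Dom_extract_last line → Spec_extract_last line (extract_last line)

-- ===== LEMMAS AND PROOFS =====

-- A's loop body at one index, with `none` in place of the fall-through to the next index.
def pvTokA (cs : List Char) (n : Int) (e : Int) : Option String :=
  match PySem.List.pyGet? cs e with
  | none => none
  | some c =>
    if PySem.Chars.isIn [c] "123456789".toList then some (String.ofList [c])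
    else if e ≤ n - 3 && PySem.Set.contains pvVALID_LEN_3 (PySem.List.slice cs (some e) (some (e + 3))) then
      some (PySem.Dict.getD pvVALID_WORDS (PySem.List.slice cs (some e) (some (e + 3))) "")
    else if e ≤ n - 4 && PySem.Set.contains pvVALID_LEN_4 (PySem.List.slice cs (some e) (some (e + 4))) then
      some (PySem.Dict.getD pvVALID_WORDS (PySem.List.slice cs (some e) (some (e + 4))) "")
    else if e ≤ n - 5 && PySem.Set.contains pvVALID_LEN_5 (PySem.List.slice cs (some e) (some (e + 5))) then
      some (PySem.Dict.getD pvVALID_WORDS (PySem.List.slice cs (some e) (some (e + 5))) "")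
    else none

theorem go_eq_findSome (cs : List Char) (n : Int) (L : List Int)
    (h : ∀ e ∈ L, (PySem.List.pyGet? cs e).isSome) :
    extract_last_go cs n L = L.findSome? (pvTokA cs n) := by
  induction L with
  | nil => rfl
  | cons e rest ih =>
    have he := h e (by simp)
    have hrest : ∀ x ∈ rest, (PySem.List.pyGet? cs x).isSome := fun x hx => h x (by simp [hx])
    obtain ⟨c, hc⟩ := Option.isSome_iff_exists.mp he
    simp only [extract_last_go, List.findSome?_cons, pvTokA, hc]
    split_ifs <;> simp [ih hrest]

theorem pvCore (l : List Char) :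
    (if (decide (3 ≤ l.length) && PySem.Set.contains pvVALID_LEN_3 (l.take 3)) = true then
       some (PySem.Dict.getD pvVALID_WORDS (l.take 3) "")
     else if (decide (4 ≤ l.length) && PySem.Set.contains pvVALID_LEN_4 (l.take 4)) = true then
       some (PySem.Dict.getD pvVALID_WORDS (l.take 4) "")
     else if (decide (5 ≤ l.length) && PySem.Set.contains pvVALID_LEN_5 (l.take 5)) = true then
       some (PySem.Dict.getD pvVALID_WORDS (l.take 5) "")
     else none)
    = (pvWORDS.find? (fun p => l.take p.1.length == p.1)).map (fun p => p.2) := by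
  have tt : ∀ (a b : Nat), a ≤ b → l.take a = (l.take b).take a := by
    intro a b h
    rw [List.take_take, Nat.min_eq_left h]
  by_cases h1 : l.take 3 = ['o', 'n', 'e']
  · have hlen : 3 ≤ l.length := by
      have hL := congrArg List.length h1
      simp [List.length_take] at hL
      omega
    have hb1 : (l.take 3 == ['o', 'n', 'e']) = true := by simp [h1]
    have g3 : 3 ≤ l.length := by omega
    simp [pvVALID_LEN_3, pvVALID_LEN_4, pvVALID_LEN_5, pvVALID_WORDS, pvWORDS, PySem.Set.contains, PySem.Set.ofList, PySem.Dict.getD, PySem.Dict.get?, PySem.Dict.ofList, List.find?, beq_iff_eq, h1, hb1, g3]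
    decide
  by_cases h2 : l.take 3 = ['t', 'w', 'o']
  · have hlen : 3 ≤ l.length := by
      have hL := congrArg List.length h2
      simp [List.length_take] at hL
      omega
    have hb1 : (l.take 3 == ['o', 'n', 'e']) = false := by simp [h1]
    have hb2 : (l.take 3 == ['t', 'w', 'o']) = true := by simp [h2]
    have g3 : 3 ≤ l.length := by omega
    simp [pvVALID_LEN_3, pvVALID_LEN_4, pvVALID_LEN_5, pvVALID_WORDS, pvWORDS, PySem.Set.contains, PySem.Set.ofList, PySem.Dict.getD, PySem.Dict.get?, PySem.Dict.ofList, List.find?, beq_iff_eq, h2, hb1, hb2, g3]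
    decide
  by_cases h3 : l.take 5 = ['t', 'h', 'r', 'e', 'e']
  · have hlen : 5 ≤ l.length := by
      have hL := congrArg List.length h3
      simp [List.length_take] at hL
      omega
    have hb1 : (l.take 3 == ['o', 'n', 'e']) = false := by simp [h1]
    have hb2 : (l.take 3 == ['t', 'w', 'o']) = false := by simp [h2]
    have hb3 : (l.take 5 == ['t', 'h', 'r', 'e', 'e']) = true := by simp [h3]
    have t3 : l.take 3 = ['t', 'h', 'r'] := by
      rw [tt 3 5 (by omega), h3]
      decide
    have t4 : l.take 4 = ['t', 'h', 'r', 'e'] := by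
      rw [tt 4 5 (by omega), h3]
      decide
    have g3 : 3 ≤ l.length := by omega
    have g4 : 4 ≤ l.length := by omega
    have g5 : 5 ≤ l.length := by omega
    simp [pvVALID_LEN_3, pvVALID_LEN_4, pvVALID_LEN_5, pvVALID_WORDS, pvWORDS, PySem.Set.contains, PySem.Set.ofList, PySem.Dict.getD, PySem.Dict.get?, PySem.Dict.ofList, List.find?, beq_iff_eq, h3, hb1, hb2, hb3, t3, t4, g3, g4, g5]
    decide
  by_cases h4 : l.take 4 = ['f', 'o', 'u', 'r']
  · have hlen : 4 ≤ l.length := by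
      have hL := congrArg List.length h4
      simp [List.length_take] at hL
      omega
    have hb1 : (l.take 3 == ['o', 'n', 'e']) = false := by simp [h1]
    have hb2 : (l.take 3 == ['t', 'w', 'o']) = false := by simp [h2]
    have hb3 : (l.take 5 == ['t', 'h', 'r', 'e', 'e']) = false := by simp [h3]
    have hb4 : (l.take 4 == ['f', 'o', 'u', 'r']) = true := by simp [h4]
    have t3 : l.take 3 = ['f', 'o', 'u'] := by
      rw [tt 3 4 (by omega), h4]
      decide
    have g3 : 3 ≤ l.length := by omega
    have g4 : 4 ≤ l.length := by omega
    simp [pvVALID_LEN_3, pvVALID_LEN_4, pvVALID_LEN_5, pvVALID_WORDS, pvWORDS, PySem.Set.contains, PySem.Set.ofList, PySem.Dict.getD, PySem.Dict.get?, PySem.Dict.ofList, List.find?, beq_iff_eq, h4, hb1, hb2, hb3, hb4, t3, g3, g4]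
    decide
  by_cases h5 : l.take 4 = ['f', 'i', 'v', 'e']
  · have hlen : 4 ≤ l.length := by
      have hL := congrArg List.length h5
      simp [List.length_take] at hL
      omega
    have hb1 : (l.take 3 == ['o', 'n', 'e']) = false := by simp [h1]
    have hb2 : (l.take 3 == ['t', 'w', 'o']) = false := by simp [h2]
    have hb3 : (l.take 5 == ['t', 'h', 'r', 'e', 'e']) = false := by simp [h3]
    have hb4 : (l.take 4 == ['f', 'o', 'u', 'r']) = false := by simp [h4]
    have hb5 : (l.take 4 == ['f', 'i', 'v', 'e']) = true := by simp [h5]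
    have t3 : l.take 3 = ['f', 'i', 'v'] := by
      rw [tt 3 4 (by omega), h5]
      decide
    have g3 : 3 ≤ l.length := by omega
    have g4 : 4 ≤ l.length := by omega
    simp [pvVALID_LEN_3, pvVALID_LEN_4, pvVALID_LEN_5, pvVALID_WORDS, pvWORDS, PySem.Set.contains, PySem.Set.ofList, PySem.Dict.getD, PySem.Dict.get?, PySem.Dict.ofList, List.find?, beq_iff_eq, h5, hb1, hb2, hb3, hb4, hb5, t3, g3, g4]
    decide
  by_cases h6 : l.take 3 = ['s', 'i', 'x']
  · have hlen : 3 ≤ l.length := by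
      have hL := congrArg List.length h6
      simp [List.length_take] at hL
      omega
    have hb1 : (l.take 3 == ['o', 'n', 'e']) = false := by simp [h1]
    have hb2 : (l.take 3 == ['t', 'w', 'o']) = false := by simp [h2]
    have hb3 : (l.take 5 == ['t', 'h', 'r', 'e', 'e']) = false := by simp [h3]
    have hb4 : (l.take 4 == ['f', 'o', 'u', 'r']) = false := by simp [h4]
    have hb5 : (l.take 4 == ['f', 'i', 'v', 'e']) = false := by simp [h5]
    have hb6 : (l.take 3 == ['s', 'i', 'x']) = true := by simp [h6]
    have g3 : 3 ≤ l.length := by omega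
    simp [pvVALID_LEN_3, pvVALID_LEN_4, pvVALID_LEN_5, pvVALID_WORDS, pvWORDS, PySem.Set.contains, PySem.Set.ofList, PySem.Dict.getD, PySem.Dict.get?, PySem.Dict.ofList, List.find?, beq_iff_eq, h6, hb1, hb2, hb3, hb4, hb5, hb6, g3]
    decide
  by_cases h7 : l.take 5 = ['s', 'e', 'v', 'e', 'n']
  · have hlen : 5 ≤ l.length := by
      have hL := congrArg List.length h7
      simp [List.length_take] at hL
      omega
    have hb1 : (l.take 3 == ['o', 'n', 'e']) = false := by simp [h1]
    have hb2 : (l.take 3 == ['t', 'w', 'o']) = false := by simp [h2]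
    have hb3 : (l.take 5 == ['t', 'h', 'r', 'e', 'e']) = false := by simp [h3]
    have hb4 : (l.take 4 == ['f', 'o', 'u', 'r']) = false := by simp [h4]
    have hb5 : (l.take 4 == ['f', 'i', 'v', 'e']) = false := by simp [h5]
    have hb6 : (l.take 3 == ['s', 'i', 'x']) = false := by simp [h6]
    have hb7 : (l.take 5 == ['s', 'e', 'v', 'e', 'n']) = true := by simp [h7]
    have t3 : l.take 3 = ['s', 'e', 'v'] := by
      rw [tt 3 5 (by omega), h7]
      decide
    have t4 : l.take 4 = ['s', 'e', 'v', 'e'] := by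
      rw [tt 4 5 (by omega), h7]
      decide
    have g3 : 3 ≤ l.length := by omega
    have g4 : 4 ≤ l.length := by omega
    have g5 : 5 ≤ l.length := by omega
    simp [pvVALID_LEN_3, pvVALID_LEN_4, pvVALID_LEN_5, pvVALID_WORDS, pvWORDS, PySem.Set.contains, PySem.Set.ofList, PySem.Dict.getD, PySem.Dict.get?, PySem.Dict.ofList, List.find?, beq_iff_eq, h7, hb1, hb2, hb3, hb4, hb5, hb6, hb7, t3, t4, g3, g4, g5]
    decide
  by_cases h8 : l.take 5 = ['e', 'i', 'g', 'h', 't']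
  · have hlen : 5 ≤ l.length := by
      have hL := congrArg List.length h8
      simp [List.length_take] at hL
      omega
    have hb1 : (l.take 3 == ['o', 'n', 'e']) = false := by simp [h1]
    have hb2 : (l.take 3 == ['t', 'w', 'o']) = false := by simp [h2]
    have hb3 : (l.take 5 == ['t', 'h', 'r', 'e', 'e']) = false := by simp [h3]
    have hb4 : (l.take 4 == ['f', 'o', 'u', 'r']) = false := by simp [h4]
    have hb5 : (l.take 4 == ['f', 'i', 'v', 'e']) = false := by simp [h5]
    have hb6 : (l.take 3 == ['s', 'i', 'x']) = false := by simp [h6]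
    have hb7 : (l.take 5 == ['s', 'e', 'v', 'e', 'n']) = false := by simp [h7]
    have hb8 : (l.take 5 == ['e', 'i', 'g', 'h', 't']) = true := by simp [h8]
    have t3 : l.take 3 = ['e', 'i', 'g'] := by
      rw [tt 3 5 (by omega), h8]
      decide
    have t4 : l.take 4 = ['e', 'i', 'g', 'h'] := by
      rw [tt 4 5 (by omega), h8]
      decide
    have g3 : 3 ≤ l.length := by omega
    have g4 : 4 ≤ l.length := by omega
    have g5 : 5 ≤ l.length := by omega
    simp [pvVALID_LEN_3, pvVALID_LEN_4, pvVALID_LEN_5, pvVALID_WORDS, pvWORDS, PySem.Set.contains, PySem.Set.ofList, PySem.Dict.getD, PySem.Dict.get?, PySem.Dict.ofList, List.find?, beq_iff_eq, h8, hb1, hb2, hb3, hb4, hb5, hb6, hb7, hb8, t3, t4, g3, g4, g5]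
    decide
  by_cases h9 : l.take 4 = ['n', 'i', 'n', 'e']
  · have hlen : 4 ≤ l.length := by
      have hL := congrArg List.length h9
      simp [List.length_take] at hL
      omega
    have hb1 : (l.take 3 == ['o', 'n', 'e']) = false := by simp [h1]
    have hb2 : (l.take 3 == ['t', 'w', 'o']) = false := by simp [h2]
    have hb3 : (l.take 5 == ['t', 'h', 'r', 'e', 'e']) = false := by simp [h3]
    have hb4 : (l.take 4 == ['f', 'o', 'u', 'r']) = false := by simp [h4]
    have hb5 : (l.take 4 == ['f', 'i', 'v', 'e']) = false := by simp [h5]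
    have hb6 : (l.take 3 == ['s', 'i', 'x']) = false := by simp [h6]
    have hb7 : (l.take 5 == ['s', 'e', 'v', 'e', 'n']) = false := by simp [h7]
    have hb8 : (l.take 5 == ['e', 'i', 'g', 'h', 't']) = false := by simp [h8]
    have hb9 : (l.take 4 == ['n', 'i', 'n', 'e']) = true := by simp [h9]
    have t3 : l.take 3 = ['n', 'i', 'n'] := by
      rw [tt 3 4 (by omega), h9]
      decide
    have g3 : 3 ≤ l.length := by omega
    have g4 : 4 ≤ l.length := by omega
    simp [pvVALID_LEN_3, pvVALID_LEN_4, pvVALID_LEN_5, pvVALID_WORDS, pvWORDS, PySem.Set.contains, PySem.Set.ofList, PySem.Dict.getD, PySem.Dict.get?, PySem.Dict.ofList, List.find?, beq_iff_eq, h9, hb1, hb2, hb3, hb4, hb5, hb6, hb7, hb8, hb9, t3, g3, g4]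
    decide
  have hb1 : (l.take 3 == ['o', 'n', 'e']) = false := by simp [h1]
  have hb2 : (l.take 3 == ['t', 'w', 'o']) = false := by simp [h2]
  have hb3 : (l.take 5 == ['t', 'h', 'r', 'e', 'e']) = false := by simp [h3]
  have hb4 : (l.take 4 == ['f', 'o', 'u', 'r']) = false := by simp [h4]
  have hb5 : (l.take 4 == ['f', 'i', 'v', 'e']) = false := by simp [h5]
  have hb6 : (l.take 3 == ['s', 'i', 'x']) = false := by simp [h6]
  have hb7 : (l.take 5 == ['s', 'e', 'v', 'e', 'n']) = false := by simp [h7]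
  have hb8 : (l.take 5 == ['e', 'i', 'g', 'h', 't']) = false := by simp [h8]
  have hb9 : (l.take 4 == ['n', 'i', 'n', 'e']) = false := by simp [h9]
  simp [pvVALID_LEN_3, pvVALID_LEN_4, pvVALID_LEN_5, pvVALID_WORDS, pvWORDS, PySem.Set.contains, PySem.Set.ofList, PySem.Dict.getD, PySem.Dict.get?, PySem.Dict.ofList, List.find?, beq_iff_eq, h1, h2, h3, h4, h5, h6, h7, h8, h9, hb1, hb2, hb3, hb4, hb5, hb6, hb7, hb8, hb9]

theorem pvMatch_map (x : Option (List Char × String)) :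
    (match x with | some p => some p.2 | none => (none : Option String)) = x.map (fun p => p.2) := by
  cases x <;> rfl

theorem tok_eq (cs : List Char) (e : Int) (h0 : 0 ≤ e) (hlt : e < (cs.length : Int)) :
    pvTokA cs (cs.length : Int) e = pvToken cs e := by
  have hget : PySem.List.pyGet? cs e = some (cs[e.toNat]'(by omega)) := by
    rw [PySem.List.pyGet?_of_nonneg cs h0, List.getElem?_eq_getElem (by omega)]
  have hsl : ∀ k : Nat, PySem.List.slice cs (some e) (some (e + (k : Int)))
      = (cs.drop e.toNat).take k := by
    intro k
    rw [PySem.List.slice_toNat cs h0 (by omega)]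
    congr 1
    omega
  have h3 := hsl 3
  have h4 := hsl 4
  have h5 := hsl 5
  push_cast at h3 h4 h5
  have hdl : (cs.drop e.toNat).length = cs.length - e.toNat := by simp
  have g3 : (e ≤ (cs.length : Int) - 3) ↔ 3 ≤ (cs.drop e.toNat).length := by omega
  have g4 : (e ≤ (cs.length : Int) - 4) ↔ 4 ≤ (cs.drop e.toNat).length := by omega
  have g5 : (e ≤ (cs.length : Int) - 5) ↔ 5 ≤ (cs.drop e.toNat).length := by omega
  unfold pvTokA pvToken
  rw [hget]
  simp only [h3, h4, h5, hsl, g3, g4, g5, pvMatch_map]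
  by_cases hd : PySem.Chars.isIn [cs[e.toNat]'(by omega)] "123456789".toList = true
  · simp only [hd, if_true]
  · simp only [Bool.not_eq_true] at hd
    simp only [hd, Bool.false_eq_true, if_false]
    exact pvCore (cs.drop e.toNat)

theorem main_eq (line : String) : extract_last line = extract_last_alt line := by
  unfold extract_last extract_last_alt
  have hn : PySem.Str.len line = (line.toList.length : Int) := by
    simp [PySem.Str.len_eq]
  set cs := line.toList with hcs
  have hrange : PySem.List.pyRange ((cs.length : Int) - 1) (-1) (-1)
      = (PySem.List.pyRange 0 (cs.length : Int) 1).reverse := by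
    simpa using PySem.List.pyRange_neg_one_eq_reverse ((cs.length : Int) - 1) (-1)
  have hmem : ∀ e ∈ (PySem.List.pyRange 0 (cs.length : Int) 1).reverse,
      (PySem.List.pyGet? cs e).isSome := by
    intro e he
    rw [List.mem_reverse, PySem.List.mem_pyRange_one] at he
    rw [PySem.List.pyGet?_of_nonneg cs he.1, List.getElem?_eq_getElem (by omega)]
    rfl
  have step2 : ((PySem.List.pyRange 0 (cs.length : Int) 1).reverse).findSome? (pvTokA cs (cs.length : Int))
      = ((PySem.List.pyRange 0 (cs.length : Int) 1).filterMap (pvTokA cs (cs.length : Int))).getLast? := by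
    rw [← List.head?_filterMap, List.filterMap_reverse, ← List.getLast?_eq_head?_reverse]
  have step3 : (PySem.List.pyRange 0 (cs.length : Int) 1).filterMap (pvTokA cs (cs.length : Int))
      = (PySem.List.pyRange 0 (cs.length : Int) 1).filterMap (pvToken cs) := by
    apply List.filterMap_congr
    intro e he
    rw [PySem.List.mem_pyRange_one] at he
    exact tok_eq cs e he.1 he.2
  simp only [hn, hrange, go_eq_findSome cs (cs.length : Int) _ hmem, step2, step3,
    PySem.List.pyGet?_neg_one]

-- ===== VERDICT (by name: the statement is the Claim_ definition above) =====
theorem extract_last_spec : Claim_equal_extract_last := by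
  intro line _
  unfold Spec_extract_last
  exact main_eq line
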